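-- pv_equiv track=rewrite | github.com/taylor-agarwal/streamlit-camouflage | webapp/camouflage/fuzzy_classifier.py | SummerMatch
-- ===== SOURCE A (Python) =====
-- def SummerMatch(outfit):
--     """
--     Bright summer outfit follow these rules
--     - At least two warm colors
--     - At least one bright color
--     - At most one dark color
--     INPUT:
--     outfit - tuple(top, bot, shs)
--         top - tuple(tone, temp)
--         bot - tuple(tone, temp)
--         shs - tuple(tone, temp)
--     OUTPUT:
--         True or False
--     """
--
--     non_neutral = [color for color in outfit if color[0] != 'NEUTRAL']
--
--     warm_count = len([color for color in non_neutral if color[1] == 'WARM'])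
--     if warm_count < 2: return False
--
--     dark_count = len([color for color in non_neutral if color[0] == 'DARK'])
--     if dark_count > 1: return False
--
--     bright_count = len(non_neutral) - dark_count
--     if bright_count < 1: return False
--
--     return True
-- ===== SOURCE B (Python) =====
-- def SummerMatch(outfit):
--     # Requirement countdown: satisfy the remaining needs as colors arrive,
--     # abort the moment the dark budget is exceeded; at the end the outfit
--     # matches iff no need is left outstanding.
--     warm_needed, dark_budget, bright_needed = 2, 1, 1
--     for tone, temp in outfit:
--         if tone == 'NEUTRAL':
--             continue
--         if temp == 'WARM':
--             warm_needed = max(warm_needed - 1, 0)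
--         if tone == 'DARK':
--             if dark_budget == 0:
--                 return False
--             dark_budget -= 1
--         else:
--             bright_needed = max(bright_needed - 1, 0)
--     return warm_needed == 0 and bright_needed == 0
-- ===== Notes on version B (the rewrite author's own statement) =====
-- stated objective: alternative
-- what changed: B replaces A's filter-count-then-compare passes with a requirement-countdown: it walks the outfit once maintaining the remaining warm-need, dark-budget and bright-need, returns False the moment the dark budget is exceeded, and at the end just checks that no need is left outstanding.
import Mathlib
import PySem

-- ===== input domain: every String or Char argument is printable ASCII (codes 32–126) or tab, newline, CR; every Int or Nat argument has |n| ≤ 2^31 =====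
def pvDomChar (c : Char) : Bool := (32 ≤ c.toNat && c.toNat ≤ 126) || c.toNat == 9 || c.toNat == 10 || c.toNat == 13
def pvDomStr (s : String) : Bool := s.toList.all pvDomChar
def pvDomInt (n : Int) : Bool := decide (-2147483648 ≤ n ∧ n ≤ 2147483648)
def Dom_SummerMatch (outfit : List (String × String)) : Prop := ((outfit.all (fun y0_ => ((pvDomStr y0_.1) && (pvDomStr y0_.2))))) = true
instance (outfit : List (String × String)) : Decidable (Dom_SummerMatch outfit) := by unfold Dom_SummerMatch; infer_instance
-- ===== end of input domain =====

-- B replaces A's filter/count/compare passes with a requirement-countdown loop (warm-need, dark-budget, bright-need) that returns early when the dark budget is exceeded (alternative decomposition, same O(n) cost).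


-- ===== PORT A =====
def SummerMatch (outfit : List (String × String)) : Bool :=
  let nonNeutral := outfit.filter (fun color => !(color.1 == "NEUTRAL"))
  let warmCount := (nonNeutral.filter (fun color => color.2 == "WARM")).length
  if warmCount < 2 then false
  else
    let darkCount := (nonNeutral.filter (fun color => color.1 == "DARK")).length
    if darkCount > 1 then false
    else
      let brightCount := nonNeutral.length - darkCount
      if brightCount < 1 then false
      else true

-- ===== PORT B =====
-- Transcription of Source B's early-return loop as structural recursion over the list;
-- Nat subtraction saturates at 0, exactly like Source B's max(x - 1, 0).
def summerJudge : List (String × String) → Nat → Nat → Nat → Bool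
  | [], warmNeeded, _, brightNeeded => warmNeeded == 0 && brightNeeded == 0
  | c :: rest, warmNeeded, darkBudget, brightNeeded =>
    if c.1 == "NEUTRAL" then summerJudge rest warmNeeded darkBudget brightNeeded
    else
      let warmNeeded' := if c.2 == "WARM" then warmNeeded - 1 else warmNeeded
      if c.1 == "DARK" then
        if darkBudget == 0 then false
        else summerJudge rest warmNeeded' (darkBudget - 1) brightNeeded
      else summerJudge rest warmNeeded' darkBudget (brightNeeded - 1)

def SummerMatch_alt (outfit : List (String × String)) : Bool :=
  summerJudge outfit 2 1 1

-- ===== PRECONDITION & SPEC =====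
def Spec_SummerMatch (outfit : List (String × String)) (out : Bool) : Prop := out = SummerMatch_alt outfit
instance (outfit : List (String × String)) (out : Bool) : Decidable (Spec_SummerMatch outfit out) := by unfold Spec_SummerMatch; infer_instance

-- ===== CLAIM (what is proved, stated in full; the proofs are below) =====
def Claim_equal_SummerMatch : Prop := ∀ (outfit : List (String × String)), Dom_SummerMatch outfit → Spec_SummerMatch outfit (SummerMatch outfit)

-- ===== LEMMAS AND PROOFS =====

def nnW (xs : List (String × String)) : Nat :=
  ((xs.filter (fun c => !(c.1 == "NEUTRAL"))).filter (fun c => c.2 == "WARM")).length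
def nnD (xs : List (String × String)) : Nat :=
  ((xs.filter (fun c => !(c.1 == "NEUTRAL"))).filter (fun c => c.1 == "DARK")).length
def nnB (xs : List (String × String)) : Nat :=
  ((xs.filter (fun c => !(c.1 == "NEUTRAL"))).filter (fun c => !(c.1 == "DARK"))).length

theorem summerJudge_eq (xs : List (String × String)) :
    ∀ wn db bn, summerJudge xs wn db bn =
      (decide (wn ≤ nnW xs) && decide (nnD xs ≤ db) && decide (bn ≤ nnB xs)) := by
  induction xs with
  | nil =>
    intro wn db bn
    rw [Bool.eq_iff_iff]
    simp [summerJudge, nnW, nnD, nnB]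
  | cons c rest ih =>
    intro wn db bn
    rw [Bool.eq_iff_iff]
    by_cases hN : c.1 == "NEUTRAL" <;> by_cases hD : c.1 == "DARK" <;>
      by_cases hW : c.2 == "WARM" <;>
      by_cases hdb : db = 0 <;>
      simp_all [summerJudge, nnW, nnD, nnB, List.filter_cons, ih] <;> omega

theorem nn_split (xs : List (String × String)) :
    (xs.filter (fun c => !(c.1 == "NEUTRAL"))).length = nnD xs + nnB xs := by
  unfold nnD nnB
  induction xs.filter (fun c => !(c.1 == "NEUTRAL")) with
  | nil => simp
  | cons c rest ih =>
    by_cases hD : c.1 == "DARK" <;> simp_all [List.filter_cons] <;> omega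

-- ===== VERDICT (by name: the statement is the Claim_ definition above) =====
theorem SummerMatch_spec : Claim_equal_SummerMatch := by
  intro outfit _
  unfold Spec_SummerMatch SummerMatch SummerMatch_alt
  rw [summerJudge_eq]
  have hs := nn_split outfit
  have hW : ((outfit.filter (fun c => !(c.1 == "NEUTRAL"))).filter (fun c => c.2 == "WARM")).length = nnW outfit := rfl
  have hD : ((outfit.filter (fun c => !(c.1 == "NEUTRAL"))).filter (fun c => c.1 == "DARK")).length = nnD outfit := rfl
  simp only [hW, hD, hs]
  split_ifs <;> simp <;> omega
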